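-- pv_equiv track=rewrite | github.com/nathawkins/CodingPractice | problem_639.py | getTwoMults
-- ===== SOURCE A (Python) =====
-- def gcd(a, b):
--     while b != 0:
--         a, b = b, a % b
--     return a
--
-- def coprime(a, b):
--     return gcd(a, b) == 1
--
-- def getTwoMults(factors):
--     for ind in range(len(factors)):
--         prod_1 = 1
--         prod_2 = 1
--
--         for i, val in enumerate(factors):
--             if i <= ind:
--                 prod_1 *= val
--             else:
--                 prod_2 *= val
--
--         if coprime(prod_1, prod_2):
--             break
--
--     return prod_1, prod_2
-- ===== SOURCE B (Python) =====
-- def _gcd(a, b):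
--     return a if b == 0 else _gcd(b, a % b)
--
-- def getTwoMults(factors):
--     n = len(factors)
--     suf = [1] * n
--     for i in range(n - 2, -1, -1):
--         suf[i] = factors[i + 1] * suf[i + 1]
--     pref = 1
--     for i in range(n):
--         pref *= factors[i]
--         if _gcd(pref, suf[i]) == 1:
--             return pref, suf[i]
-- ===== Notes on version B (the rewrite author's own statement) =====
-- stated objective: alternative
-- what changed: A recomputes both split products from scratch with a full enumerate pass per split point; B precomputes the suffix-product list once back-to-front and keeps a running prefix product in a single forward pass, returning at the first coprime split (O(n) instead of O(n^2) multiplications, though big-int gcd cost dominates so a timing run read only ~1.4x).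
-- outside the precondition, e.g. on getTwoMults([]): A raises NameError, B returns None
import Mathlib
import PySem

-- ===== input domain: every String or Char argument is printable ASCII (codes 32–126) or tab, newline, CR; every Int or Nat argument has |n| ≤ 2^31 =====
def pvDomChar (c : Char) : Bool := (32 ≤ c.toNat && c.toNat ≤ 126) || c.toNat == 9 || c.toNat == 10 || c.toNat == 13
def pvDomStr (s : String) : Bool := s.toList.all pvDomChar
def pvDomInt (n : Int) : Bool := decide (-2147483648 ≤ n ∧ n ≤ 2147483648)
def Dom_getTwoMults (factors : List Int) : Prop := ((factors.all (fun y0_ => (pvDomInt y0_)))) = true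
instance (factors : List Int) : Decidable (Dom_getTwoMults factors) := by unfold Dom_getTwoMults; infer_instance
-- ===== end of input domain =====

-- B replaces A's per-split-point full rescan by one precomputed suffix-product list plus a
-- single forward prefix pass (objective: alternative algorithm, fewer multiplications).

-- termination fact for the Euclidean loops of both ports
theorem pvModNatAbsLt (a b : Int) (h : ¬ b = 0) : (PySem.Int.mod a b).natAbs < b.natAbs := by
  rcases lt_or_gt_of_ne h with hb | hb
  · have hB := PySem.Int.mod_neg_bounds a hb
    omega
  · have h1 := PySem.Int.mod_nonneg a hb
    have h2 := PySem.Int.mod_lt a hb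
    omega

-- ===== PORT A =====
-- A's gcd: while b != 0: a, b = b, a % b
def gcdA (a b : Int) : Int :=
  if h : b = 0 then a else gcdA b (PySem.Int.mod a b)
termination_by b.natAbs
decreasing_by exact pvModNatAbsLt a b h

def coprimeA (a b : Int) : Bool := gcdA a b == 1

-- inner 'for i, val in enumerate(factors)' pass of A
def innerA (factors : List Int) (ind : Int) : Int × Int :=
  (PySem.List.enumerate factors 0).foldl
    (fun p iv => if iv.1 ≤ ind then (p.1 * iv.2, p.2) else (p.1, p.2 * iv.2)) (1, 1)

-- outer 'for ind in range(len(factors))' with break; `last` is the leaked (prod_1, prod_2)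
def loopA (factors : List Int) (inds : List Int) (last : Int × Int) : Int × Int :=
  match inds with
  | [] => last
  | ind :: rest =>
    let p := innerA factors ind
    if coprimeA p.1 p.2 then p else loopA factors rest p

def getTwoMults (factors : List Int) : Int × Int :=
  loopA factors (PySem.List.pyRange 0 (factors.length : Int) 1) (1, 1)

-- ===== PORT B =====
-- B's recursive gcd
def gcdB (a b : Int) : Int :=
  if h : b = 0 then a else gcdB b (PySem.Int.mod a b)
termination_by b.natAbs
decreasing_by exact pvModNatAbsLt a b h

-- B's backward pass building suf (suf[i] = factors[i+1] * suf[i+1], suf[n-1] = 1)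
def sufB : List Int → List Int
  | [] => []
  | [_] => [1]
  | _ :: y :: ys => let s := sufB (y :: ys); (y * s.headI) :: s

-- B's single forward pass over factors and suf in lockstep, pref the running prefix product
def loopB : List Int → List Int → Int → Int × Int
  | x :: xs, s :: ss, pref =>
    let p := pref * x
    if gcdB p s == 1 then (p, s) else loopB xs ss p
  | _, _, _ => (1, 1)   -- unreachable for nonempty input: the last split always has gcd 1

def getTwoMults_alt (factors : List Int) : Int × Int :=
  loopB factors (sufB factors) 1

-- ===== PRECONDITION & SPEC =====
-- A raises NameError on [] (the loop body never runs, prod_1/prod_2 are unbound): excluded.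
def Pre_getTwoMults (factors : List Int) : Prop := factors ≠ []
instance (factors : List Int) : Decidable (Pre_getTwoMults factors) := by unfold Pre_getTwoMults; infer_instance

def pvWitness_getTwoMults : List Int := [6, 35]

def Spec_getTwoMults (factors : List Int) (out : Int × Int) : Prop := out = getTwoMults_alt factors
instance (factors : List Int) (out : Int × Int) : Decidable (Spec_getTwoMults factors out) := by unfold Spec_getTwoMults; infer_instance

-- ===== CLAIM (what is proved, stated in full; the proofs are below) =====
def Claim_equal_getTwoMults : Prop := ∀ (factors : List Int), Dom_getTwoMults factors → Pre_getTwoMults factors → Spec_getTwoMults factors (getTwoMults factors)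

-- ===== LEMMAS AND PROOFS =====

theorem gcd_eq (a b : Int) : gcdA a b = gcdB a b := by
  rw [gcdA, gcdB]
  split
  · rfl
  · exact gcd_eq b (PySem.Int.mod a b)
termination_by b.natAbs
decreasing_by exact pvModNatAbsLt a b (by assumption)

theorem gcdA_one (p : Int) : gcdA p 1 = 1 := by
  have hm : PySem.Int.mod p 1 = 0 := (PySem.Int.mod_eq_zero_iff_dvd p 1).mpr (one_dvd p)
  rw [gcdA]
  simp only [one_ne_zero, dite_false, hm]
  rw [gcdA]
  simp

-- all enumerate indices strictly above ind: everything multiplies into the second slot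
theorem foldE_gt (xs : List Int) : ∀ (s ind a b : Int), ind < s →
    (PySem.List.enumerate xs s).foldl
      (fun p iv => if iv.1 ≤ ind then (p.1 * iv.2, p.2) else (p.1, p.2 * iv.2)) (a, b)
    = (a, b * xs.prod) := by
  induction xs with
  | nil => intro s ind a b _; simp [PySem.List.enumerate_nil]
  | cons x xs ih =>
    intro s ind a b h
    rw [PySem.List.enumerate_cons]
    simp only [List.foldl_cons, if_neg (by omega : ¬ s ≤ ind)]
    rw [ih (s + 1) ind a (b * x) (by omega)]
    simp [mul_assoc]

theorem foldE (xs : List Int) : ∀ (s ind a b : Int), s ≤ ind →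
    (PySem.List.enumerate xs s).foldl
      (fun p iv => if iv.1 ≤ ind then (p.1 * iv.2, p.2) else (p.1, p.2 * iv.2)) (a, b)
    = (a * (xs.take ((ind - s).toNat + 1)).prod, b * (xs.drop ((ind - s).toNat + 1)).prod) := by
  induction xs with
  | nil => intro s ind a b _; simp [PySem.List.enumerate_nil]
  | cons x xs ih =>
    intro s ind a b h
    rw [PySem.List.enumerate_cons]
    simp only [List.foldl_cons, if_pos h]
    by_cases h' : s + 1 ≤ ind
    · rw [ih (s + 1) ind (a * x) b h']
      have hT : (ind - s).toNat + 1 = ((ind - (s + 1)).toNat + 1) + 1 := by omega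
      rw [hT]
      simp [List.take_succ_cons, List.drop_succ_cons, mul_assoc]
    · have hs : s = ind := by omega
      rw [foldE_gt xs (s + 1) ind (a * x) b (by omega)]
      have hT : (ind - s).toNat + 1 = 1 := by omega
      rw [hT]
      simp

theorem innerA_eq (factors : List Int) (k : Nat) :
    innerA factors (k : Int) = ((factors.take (k + 1)).prod, (factors.drop (k + 1)).prod) := by
  unfold innerA
  rw [foldE factors 0 (k : Int) 1 1 (by positivity)]
  simp

theorem headI_sufB (x : Int) (xs : List Int) : (sufB (x :: xs)).headI = xs.prod := by
  induction xs generalizing x with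
  | nil => simp [sufB]
  | cons y ys ih => simp [sufB, ih y]

theorem sufB_cons (x y : Int) (ys : List Int) :
    sufB (x :: y :: ys) = (y :: ys).prod :: sufB (y :: ys) := by
  simp [sufB, headI_sufB y ys, List.prod_cons]

theorem main_eq (factors : List Int) (k : Nat) (last : Int × Int) (hk : k < factors.length) :
    loopA factors (PySem.List.pyRange (k : Int) (factors.length : Int) 1) last
      = loopB (factors.drop k) (sufB (factors.drop k)) (factors.take k).prod := by
  rw [PySem.List.pyRange_one_cons (by exact_mod_cast hk)]
  have hdropk : factors.drop k = factors[k] :: factors.drop (k + 1) :=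
    List.drop_eq_getElem_cons hk
  have htakek : (factors.take (k + 1)).prod = (factors.take k).prod * factors[k] :=
    List.prod_take_succ factors k hk
  rw [loopA]
  simp only [innerA_eq factors k]
  by_cases hend : k + 1 < factors.length
  · -- the tail after the split is still nonempty
    have hdrop1 : factors.drop (k + 1) = factors[k+1] :: factors.drop (k + 2) :=
      List.drop_eq_getElem_cons hend
    rw [hdropk, hdrop1, sufB_cons, loopB]
    simp only [← hdrop1, ← htakek, coprimeA, gcd_eq]
    by_cases hg : gcdB (factors.take (k + 1)).prod (factors.drop (k + 1)).prod == 1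
    · simp [hg]
    · simp only [hg, Bool.false_eq_true, if_false]
      have : (k : Int) + 1 = ((k + 1 : Nat) : Int) := by push_cast; ring
      rw [this, main_eq factors (k + 1) _ hend]
  · -- last split point: suffix product is 1, gcd is 1, both return here
    have hdrop1 : factors.drop (k + 1) = [] := by
      apply List.drop_eq_nil_of_le; omega
    rw [hdropk, hdrop1]
    have hg1 : gcdB (factors.take (k + 1)).prod 1 = 1 := by
      rw [← gcd_eq]; exact gcdA_one _
    simp only [coprimeA, List.prod_nil, gcdA_one, beq_self_eq_true, if_pos]
    simp [sufB, loopB, hg1, ← htakek]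
termination_by factors.length - k
decreasing_by omega

-- ===== VERDICT (by name: the statement is the Claim_ definition above) =====
theorem getTwoMults_spec : Claim_equal_getTwoMults := by
  intro factors _ hpre
  unfold Spec_getTwoMults getTwoMults getTwoMults_alt
  have hlen : 0 < factors.length := List.length_pos_iff.mpr hpre
  have h0 : (0 : Int) = ((0 : Nat) : Int) := rfl
  rw [h0, main_eq factors 0 (1, 1) hlen]
  simp
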